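-- pv_equiv track=rewrite | github.com/Zaskars/shewhart | shewhart_app/components/service/detectors.py | detect_shifts_x
-- ===== SOURCE A (Python) =====
-- def detect_shifts_x(data_points, mean_value):
--     above_mean = 0
--     below_mean = 0
--     for point in data_points:
--         if point > mean_value:
--             above_mean += 1
--             below_mean = 0
--         elif point < mean_value:
--             below_mean += 1
--             above_mean = 0
--         else:
--             above_mean = 0
--             below_mean = 0
--
--         if (
--             above_mean >= 8
--         ):  # значение 8 может быть изменено в зависимости от ваших потребностей
--             return True, "Shift above the mean detected"
--         if below_mean >= 8:
--             return True, "Shift below the mean detected"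
--
--     return False, ""
-- ===== SOURCE B (Python) =====
-- def detect_shifts_x(data_points, mean_value):
--     pts = list(data_points)
--     n = len(pts)
--     i = 0
--     while i < n:
--         sign = (pts[i] > mean_value) - (pts[i] < mean_value)
--         j = i + 1
--         while j < n and ((pts[j] > mean_value) - (pts[j] < mean_value)) == sign:
--             j += 1
--         if sign != 0 and j - i >= 8:
--             if sign > 0:
--                 return True, "Shift above the mean detected"
--             return True, "Shift below the mean detected"
--         i = j
--     return False, ""
-- ===== Notes on version B (the rewrite author's own statement) =====
-- stated objective: alternative
-- what changed: Replaces the two reset-on-switch counters with a run-based scan: each maximal same-side run is measured with an inner advance (takeWhile/dropWhile in the port) and a run of length >= 8 on one side reports the shift.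
import Mathlib
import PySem

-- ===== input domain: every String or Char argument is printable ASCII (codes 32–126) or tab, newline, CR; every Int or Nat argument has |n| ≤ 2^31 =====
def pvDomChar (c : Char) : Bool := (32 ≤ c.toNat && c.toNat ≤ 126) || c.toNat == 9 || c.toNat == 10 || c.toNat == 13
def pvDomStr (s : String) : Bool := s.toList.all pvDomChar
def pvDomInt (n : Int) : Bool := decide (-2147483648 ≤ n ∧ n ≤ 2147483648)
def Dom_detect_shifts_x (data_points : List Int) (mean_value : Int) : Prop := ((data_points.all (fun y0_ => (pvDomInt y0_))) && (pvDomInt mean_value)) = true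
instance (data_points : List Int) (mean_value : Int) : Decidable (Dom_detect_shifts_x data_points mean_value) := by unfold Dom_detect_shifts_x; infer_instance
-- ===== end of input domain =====

-- B replaces A's two reset-on-switch counters by a run-based scan (maximal same-side runs); same cost, different decomposition.

-- ===== PORT A =====
-- A's loop: two counters, reset on side switch, early return at 8.
def detectShiftsLoopA (mean_value : Int) : List Int → Nat → Nat → Bool × String
  | [], _, _ => (false, "")
  | p :: rest, above_mean, below_mean =>
    let st : Nat × Nat :=
      if mean_value < p then (above_mean + 1, 0)
      else if p < mean_value then (0, below_mean + 1)
      else (0, 0)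
    if 8 ≤ st.1 then (true, "Shift above the mean detected")
    else if 8 ≤ st.2 then (true, "Shift below the mean detected")
    else detectShiftsLoopA mean_value rest st.1 st.2

def detect_shifts_x (data_points : List Int) (mean_value : Int) : Bool × String :=
  detectShiftsLoopA mean_value data_points 0 0

-- ===== PORT B =====
-- sign of p relative to the mean: (p > m) - (p < m)
def pvSign (p mean_value : Int) : Int :=
  (if mean_value < p then (1 : Int) else 0) - (if p < mean_value then (1 : Int) else 0)

-- B's outer loop: measure the maximal run at the front (inner advance = takeWhile/dropWhile), then jump past it.
def detectShiftsRunsB (mean_value : Int) : List Int → Bool × String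
  | [] => (false, "")
  | x :: xs =>
    let s := pvSign x mean_value
    let run := xs.takeWhile (fun y => pvSign y mean_value == s)
    let rest := xs.dropWhile (fun y => pvSign y mean_value == s)
    if s ≠ 0 ∧ 8 ≤ run.length + 1 then
      if 0 < s then (true, "Shift above the mean detected")
      else (true, "Shift below the mean detected")
    else detectShiftsRunsB mean_value rest
termination_by l => l.length
decreasing_by
  simp only [List.length_cons]
  exact Nat.lt_succ_of_le (List.length_dropWhile_le _ _)

def detect_shifts_x_alt (data_points : List Int) (mean_value : Int) : Bool × String :=
  detectShiftsRunsB mean_value data_points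

-- ===== PRECONDITION & SPEC =====
def Spec_detect_shifts_x (data_points : List Int) (mean_value : Int) (out : Bool × String) : Prop := out = detect_shifts_x_alt data_points mean_value
instance (data_points : List Int) (mean_value : Int) (out : Bool × String) : Decidable (Spec_detect_shifts_x data_points mean_value out) := by unfold Spec_detect_shifts_x; infer_instance

-- ===== CLAIM (what is proved, stated in full; the proofs are below) =====
def Claim_equal_detect_shifts_x : Prop := ∀ (data_points : List Int) (mean_value : Int), Dom_detect_shifts_x data_points mean_value → Spec_detect_shifts_x data_points mean_value (detect_shifts_x data_points mean_value)

-- ===== LEMMAS AND PROOFS =====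

lemma pvSign_eq_one {p m : Int} : pvSign p m = 1 ↔ m < p := by
  unfold pvSign; split_ifs with h1 h2 <;> simp_all <;> omega

lemma pvSign_eq_neg_one {p m : Int} : pvSign p m = -1 ↔ p < m := by
  unfold pvSign; split_ifs with h1 h2 <;> simp_all <;> omega

lemma pvSign_eq_zero {p m : Int} : pvSign p m = 0 ↔ (¬ m < p ∧ ¬ p < m) := by
  unfold pvSign; split_ifs with h1 h2 <;> simp_all <;> omega

-- first element of dropWhile fails the predicate
lemma dropWhile_head_false {α : Type} (p : α → Bool) :
    ∀ (l : List α) (y : α) (ys : List α), l.dropWhile p = y :: ys → p y = false := by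
  intro l
  induction l with
  | nil => intro y ys h; simp [List.dropWhile] at h
  | cons a l ih =>
    intro y ys h
    by_cases hp : p a
    · rw [List.dropWhile_cons_of_pos hp] at h; exact ih y ys h
    · rw [List.dropWhile_cons_of_neg hp] at h
      cases h; simpa using hp

-- a leftover above-counter < 8 is irrelevant when the next point is not above the mean
lemma loopA_reset_above (m : Int) (l : List Int) (a : Nat) (ha : a < 8)
    (h : ∀ y ys, l = y :: ys → ¬ m < y) :
    detectShiftsLoopA m l a 0 = detectShiftsLoopA m l 0 0 := by
  cases l with
  | nil => rfl
  | cons y ys =>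
    have hy := h y ys rfl
    simp only [detectShiftsLoopA, if_neg hy]

lemma loopA_reset_below (m : Int) (l : List Int) (b : Nat) (hb : b < 8)
    (h : ∀ y ys, l = y :: ys → ¬ y < m) :
    detectShiftsLoopA m l 0 b = detectShiftsLoopA m l 0 0 := by
  cases l with
  | nil => rfl
  | cons y ys =>
    have hy := h y ys rfl
    by_cases hgt : m < y
    · simp only [detectShiftsLoopA, if_pos hgt]
    · simp only [detectShiftsLoopA, if_neg hgt, if_neg hy]

-- A over a run of points strictly above the mean
lemma loopA_run_above (m : Int) :
    ∀ (r : List Int), (∀ y ∈ r, m < y) → ∀ (rest : List Int) (a : Nat), a < 8 →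
      detectShiftsLoopA m (r ++ rest) a 0 =
        if 8 ≤ a + r.length then (true, "Shift above the mean detected")
        else detectShiftsLoopA m rest (a + r.length) 0 := by
  intro r
  induction r with
  | nil => intro _ rest a ha; simp [Nat.not_le.mpr ha]
  | cons y r ih =>
    intro hall rest a ha
    have hy : m < y := hall y (by simp)
    have hall' : ∀ z ∈ r, m < z := fun z hz => hall z (by simp [hz])
    simp only [List.cons_append, detectShiftsLoopA, if_pos hy]
    by_cases h8 : 8 ≤ a + 1
    · have : 8 ≤ a + (y :: r).length := by simp [List.length_cons]; omega
      simp only [List.length_cons]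
      rw [if_pos (by omega : 8 ≤ a + 1), if_pos (by omega : 8 ≤ a + (r.length + 1))]
    · rw [if_neg h8]
      simp only [show ¬ (8 : Nat) ≤ 0 by omega, if_neg, if_false]
      rw [ih hall' rest (a + 1) (by omega)]
      simp only [List.length_cons]
      congr 2 <;> omega

-- A over a run of points strictly below the mean
lemma loopA_run_below (m : Int) :
    ∀ (r : List Int), (∀ y ∈ r, y < m) → ∀ (rest : List Int) (b : Nat), b < 8 →
      detectShiftsLoopA m (r ++ rest) 0 b =
        if 8 ≤ b + r.length then (true, "Shift below the mean detected")
        else detectShiftsLoopA m rest 0 (b + r.length) := by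
  intro r
  induction r with
  | nil => intro _ rest b hb; simp [Nat.not_le.mpr hb]
  | cons y r ih =>
    intro hall rest b hb
    have hy : y < m := hall y (by simp)
    have hgt : ¬ m < y := by omega
    have hall' : ∀ z ∈ r, z < m := fun z hz => hall z (by simp [hz])
    simp only [List.cons_append, detectShiftsLoopA, if_neg hgt, if_pos hy]
    by_cases h8 : 8 ≤ b + 1
    · simp only [List.length_cons]
      rw [if_neg (by omega : ¬ (8:Nat) ≤ 0), if_pos (by omega : 8 ≤ b + 1),
          if_pos (by omega : 8 ≤ b + (r.length + 1))]
    · rw [if_neg (by omega : ¬ (8:Nat) ≤ 0), if_neg h8]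
      rw [ih hall' rest (b + 1) (by omega)]
      simp only [List.length_cons]
      congr 2 <;> omega

-- A over a run of points equal to the mean: everything resets
lemma loopA_run_zero (m : Int) :
    ∀ (r : List Int), (∀ y ∈ r, ¬ m < y ∧ ¬ y < m) → ∀ (rest : List Int),
      detectShiftsLoopA m (r ++ rest) 0 0 = detectShiftsLoopA m rest 0 0 := by
  intro r
  induction r with
  | nil => intro _ rest; rfl
  | cons y r ih =>
    intro hall rest
    obtain ⟨h1, h2⟩ := hall y (by simp)
    have hall' : ∀ z ∈ r, ¬ m < z ∧ ¬ z < m := fun z hz => hall z (by simp [hz])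
    simp only [List.cons_append, detectShiftsLoopA, if_neg h1, if_neg h2]
    simpa [show ¬ (8:Nat) ≤ 0 by omega] using ih hall' rest

lemma loopA_eq_runsB (m : Int) : ∀ (l : List Int),
    detectShiftsLoopA m l 0 0 = detectShiftsRunsB m l := by
  suffices H : ∀ (n : Nat) (l : List Int), l.length ≤ n →
      detectShiftsLoopA m l 0 0 = detectShiftsRunsB m l from
    fun l => H l.length l le_rfl
  intro n
  induction n with
  | zero =>
    intro l hl
    rw [List.length_eq_zero_iff.mp (Nat.le_zero.mp hl)]
    rw [detectShiftsRunsB.eq_1]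
    rfl
  | succ n ih' =>
  intro l hl
  have ih : ∀ (l' : List Int), l'.length < l.length → detectShiftsLoopA m l' 0 0 = detectShiftsRunsB m l' :=
    fun l' h => ih' l' (by omega)
  cases l with
  | nil => rw [detectShiftsRunsB.eq_1]; rfl
  | cons x xs =>
    set p : Int → Bool := fun y => pvSign y m == pvSign x m with hp
    have hsplit : x :: xs = (x :: xs.takeWhile p) ++ xs.dropWhile p := by
      simp [List.takeWhile_append_dropWhile]
    have htw : ∀ y ∈ xs.takeWhile p, pvSign y m = pvSign x m := by
      intro y hy
      have := List.mem_takeWhile_imp hy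
      simpa [hp] using this
    have hrest : xs.dropWhile p = xs.dropWhile (fun y => pvSign y m == pvSign x m) := by rfl
    have hlen : (xs.dropWhile p).length < (x :: xs).length :=
      Nat.lt_succ_of_le (List.length_dropWhile_le _ _)
    have hdrop : ∀ y ys, xs.dropWhile p = y :: ys → pvSign y m ≠ pvSign x m := by
      intro y ys h
      have := dropWhile_head_false p xs y ys h
      simpa [hp] using this
    rcases lt_trichotomy x m with hx | hx | hx
    · -- pvSign x m = -1 : a below-run
      have hs : pvSign x m = -1 := pvSign_eq_neg_one.mpr hx
      have hall : ∀ y ∈ x :: xs.takeWhile p, y < m := by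
        intro y hy
        rcases List.mem_cons.mp hy with h | h
        · exact h ▸ hx
        · exact pvSign_eq_neg_one.mp ((htw y h).trans hs)
      conv_lhs => rw [hsplit]
      rw [loopA_run_below m _ hall _ 0 (by omega)]
      rw [detectShiftsRunsB.eq_2, ← hp]
      simp only [hs]
      by_cases h8 : 8 ≤ (xs.takeWhile p).length + 1
      · rw [if_pos (by simp [List.length_cons]; omega : 8 ≤ 0 + (x :: xs.takeWhile p).length)]
        rw [if_pos ⟨by decide, by simpa [hp] using h8⟩]
        norm_num
      · rw [if_neg (by simp [List.length_cons]; omega : ¬ 8 ≤ 0 + (x :: xs.takeWhile p).length)]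
        rw [if_neg (by intro h; exact h8 (by simpa [hp] using h.2))]
        have hreset : detectShiftsLoopA m (xs.dropWhile p) 0 (0 + (x :: xs.takeWhile p).length)
            = detectShiftsLoopA m (xs.dropWhile p) 0 0 := by
          apply loopA_reset_below m _ _ (by simp [List.length_cons]; omega)
          intro y ys h
          have hne := hdrop y ys h
          rw [hs] at hne
          intro hlt
          exact hne (pvSign_eq_neg_one.mpr hlt)
        rw [hreset, ih _ hlen, hrest]
    · -- pvSign x m = 0 : a zero-run
      have hs : pvSign x m = 0 := pvSign_eq_zero.mpr (by omega)
      have hall : ∀ y ∈ x :: xs.takeWhile p, ¬ m < y ∧ ¬ y < m := by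
        intro y hy
        rcases List.mem_cons.mp hy with h | h
        · subst h; omega
        · exact pvSign_eq_zero.mp ((htw y h).trans hs)
      conv_lhs => rw [hsplit]
      rw [loopA_run_zero m _ hall]
      rw [detectShiftsRunsB.eq_2, ← hp]
      rw [if_neg (by simp [hs])]
      rw [ih _ hlen, hrest]
    · -- pvSign x m = 1 : an above-run
      have hs : pvSign x m = 1 := pvSign_eq_one.mpr hx
      have hall : ∀ y ∈ x :: xs.takeWhile p, m < y := by
        intro y hy
        rcases List.mem_cons.mp hy with h | h
        · exact h ▸ hx
        · exact pvSign_eq_one.mp ((htw y h).trans hs)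
      conv_lhs => rw [hsplit]
      rw [loopA_run_above m _ hall _ 0 (by omega)]
      rw [detectShiftsRunsB.eq_2, ← hp]
      simp only [hs]
      by_cases h8 : 8 ≤ (xs.takeWhile p).length + 1
      · rw [if_pos (by simp [List.length_cons]; omega : 8 ≤ 0 + (x :: xs.takeWhile p).length)]
        rw [if_pos ⟨by decide, by simpa [hp] using h8⟩]
        norm_num
      · rw [if_neg (by simp [List.length_cons]; omega : ¬ 8 ≤ 0 + (x :: xs.takeWhile p).length)]
        rw [if_neg (by intro h; exact h8 (by simpa [hp] using h.2))]
        have hreset : detectShiftsLoopA m (xs.dropWhile p) (0 + (x :: xs.takeWhile p).length) 0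
            = detectShiftsLoopA m (xs.dropWhile p) 0 0 := by
          apply loopA_reset_above m _ _ (by simp [List.length_cons]; omega)
          intro y ys h
          have hne := hdrop y ys h
          rw [hs] at hne
          intro hlt
          exact hne (pvSign_eq_one.mpr hlt)
        rw [hreset, ih _ hlen, hrest]

-- ===== VERDICT (by name: the statement is the Claim_ definition above) =====
theorem detect_shifts_x_spec : Claim_equal_detect_shifts_x := by
  intro data_points mean_value _
  unfold Spec_detect_shifts_x detect_shifts_x detect_shifts_x_alt
  exact loopA_eq_runsB mean_value data_points
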